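-- pv_equiv track=rewrite | github.com/BayesTheory/Comp1 | trab10.py | series_repetidas
-- ===== SOURCE A (Python) =====
-- def series_repetidas(lista_dados):
--     x = 0
--     anterior_igual = False
--
--     for i in range(1, len(lista_dados)):
--         if lista_dados[i-1] == lista_dados[i] and not anterior_igual:
--             x += 1
--             anterior_igual = True
--         elif lista_dados[i-1] != lista_dados[i]:
--             anterior_igual = False
--
--     return x
-- ===== SOURCE B (Python) =====
-- def _runs(xs):
--     runs = []
--     i = 0
--     while i < len(xs):
--         j = i + 1
--         while j < len(xs) and xs[j] == xs[i]:
--             j += 1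
--         runs.append(xs[i:j])
--         i = j
--     return runs
--
-- def series_repetidas(lista_dados):
--     return sum(1 for run in _runs(lista_dados) if len(run) > 1)
-- ===== Notes on version B (the rewrite author's own statement) =====
-- stated objective: alternative
-- what changed: Replaces the index loop with the anterior_igual flag state machine by a grouping decomposition: split the list into maximal runs of equal consecutive elements, then count the runs of length greater than 1.
import Mathlib
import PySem

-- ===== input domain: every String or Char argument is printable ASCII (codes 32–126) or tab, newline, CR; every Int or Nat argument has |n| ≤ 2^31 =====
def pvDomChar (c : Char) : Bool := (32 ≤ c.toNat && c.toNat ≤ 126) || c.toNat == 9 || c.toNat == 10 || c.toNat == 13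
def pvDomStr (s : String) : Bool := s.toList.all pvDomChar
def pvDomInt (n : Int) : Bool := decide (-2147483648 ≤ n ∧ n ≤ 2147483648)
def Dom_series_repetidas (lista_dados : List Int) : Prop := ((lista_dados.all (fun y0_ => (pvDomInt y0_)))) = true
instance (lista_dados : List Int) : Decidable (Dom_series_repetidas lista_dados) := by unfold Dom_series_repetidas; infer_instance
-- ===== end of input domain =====

-- B replaces A's anterior_igual flag state machine by a grouping decomposition
-- (split into maximal runs, count runs of length > 1); alternative, same cost.


-- ===== PORT A =====
-- literal port: for i in range(1, len(l)) with state (x, anterior_igual);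
-- pyGetD is exact here since every index read is in range
def series_repetidas (lista_dados : List Int) : Int :=
  ((PySem.List.pyRange 1 (lista_dados.length : Int) 1).foldl
    (fun (s : Int × Bool) i =>
      if PySem.List.pyGetD lista_dados (i - 1) 0 = PySem.List.pyGetD lista_dados i 0 ∧ s.2 = false then
        (s.1 + 1, true)
      else if PySem.List.pyGetD lista_dados (i - 1) 0 ≠ PySem.List.pyGetD lista_dados i 0 then
        (s.1, false)
      else s)
    (0, false)).1

-- ===== PORT B =====
-- _runs: split into maximal runs of equal consecutive elements
def pvRunsB (xs : List Int) : List (List Int) :=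
  match xs with
  | [] => []
  | x :: rest => (x :: rest.takeWhile (· == x)) :: pvRunsB (rest.dropWhile (· == x))
termination_by xs.length
decreasing_by
  simp only [List.length_cons]
  exact Nat.lt_succ_of_le (List.length_dropWhile_le _ _)

-- sum(1 for run in runs if len(run) > 1) = count of runs with length > 1
def series_repetidas_alt (lista_dados : List Int) : Int :=
  ((pvRunsB lista_dados).countP (fun run => 1 < run.length) : Int)

-- ===== PRECONDITION & SPEC =====
def Spec_series_repetidas (lista_dados : List Int) (out : Int) : Prop := out = series_repetidas_alt lista_dados
instance (lista_dados : List Int) (out : Int) : Decidable (Spec_series_repetidas lista_dados out) := by unfold Spec_series_repetidas; infer_instance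

-- ===== CLAIM (what is proved, stated in full; the proofs are below) =====
def Claim_equal_series_repetidas : Prop := ∀ (lista_dados : List Int), Dom_series_repetidas lista_dados → Spec_series_repetidas lista_dados (series_repetidas lista_dados)

-- ===== LEMMAS AND PROOFS =====

theorem pvRunsB_nil : pvRunsB [] = [] := by rw [pvRunsB.eq_def]

theorem pvRunsB_cons (x : Int) (rest : List Int) :
    pvRunsB (x :: rest) = (x :: rest.takeWhile (· == x)) :: pvRunsB (rest.dropWhile (· == x)) := by
  rw [pvRunsB.eq_def]

-- A's loop as a structural state machine: prev = l[i-1], s = (x, anterior_igual)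
def pvLoopA (prev : Int) (s : Int × Bool) : List Int → Int × Bool
  | [] => s
  | y :: ys =>
    if prev = y ∧ s.2 = false then pvLoopA y (s.1 + 1, true) ys
    else if prev ≠ y then pvLoopA y (s.1, false) ys
    else pvLoopA y s ys

-- bridge: the indexed fold over range(j, len l) equals pvLoopA on the suffix drop j
theorem pvBridge (l : List Int) (j : Nat) (hj : 1 ≤ j) (s : Int × Bool) :
    ((PySem.List.pyRange (j : Int) (l.length : Int) 1).foldl
      (fun (s : Int × Bool) i =>
        if PySem.List.pyGetD l (i - 1) 0 = PySem.List.pyGetD l i 0 ∧ s.2 = false then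
          (s.1 + 1, true)
        else if PySem.List.pyGetD l (i - 1) 0 ≠ PySem.List.pyGetD l i 0 then
          (s.1, false)
        else s)
      s) = pvLoopA (l.getD (j - 1) 0) s (l.drop j) := by
  by_cases h : l.length ≤ j
  · rw [PySem.List.pyRange_one_eq_nil (by exact_mod_cast h), List.drop_of_length_le h]
    simp [pvLoopA]
  · push_neg at h
    rw [PySem.List.pyRange_one_cons (by exact_mod_cast h)]
    simp only [List.foldl_cons]
    have h1 : ((j : Int) - 1) = ((j - 1 : Nat) : Int) := by omega
    have hg1 : PySem.List.pyGetD l ((j : Int) - 1) 0 = l.getD (j - 1) 0 := by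
      rw [h1, PySem.List.pyGetD_natCast]
    have hg2 : PySem.List.pyGetD l (j : Int) 0 = l.getD j 0 := PySem.List.pyGetD_natCast ..
    have hdrop : l.drop j = l.getD j 0 :: l.drop (j + 1) := by
      rw [List.getD_eq_getElem _ _ h, ← List.getElem_cons_drop h]
    rw [hg1, hg2, hdrop]
    by_cases hc : l.getD (j - 1) 0 = l.getD j 0 ∧ s.2 = false
    · rw [if_pos hc]
      rw [pvLoopA, if_pos hc]
      have := pvBridge l (j + 1) (by omega) (s.1 + 1, true)
      simpa using this
    · rw [if_neg hc, pvLoopA, if_neg hc]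
      by_cases hne : l.getD (j - 1) 0 ≠ l.getD j 0
      · rw [if_pos hne, if_pos hne]
        have := pvBridge l (j + 1) (by omega) (s.1, false)
        simpa using this
      · rw [if_neg hne, if_neg hne]
        have := pvBridge l (j + 1) (by omega) s
        simpa using this
termination_by l.length - j

-- unfolding equation for B's count on a cons cell
theorem pvCountB_cons (x : Int) (rest : List Int) :
    ((pvRunsB (x :: rest)).countP (fun run => 1 < run.length) : Int)
      = (if rest.takeWhile (· == x) = [] then 0 else 1)
        + ((pvRunsB (rest.dropWhile (· == x))).countP (fun run => 1 < run.length) : Int) := by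
  rw [pvRunsB_cons]
  simp only [List.countP_cons]
  by_cases h : rest.takeWhile (· == x) = []
  · simp [h]
  · have hlen : 1 < (x :: rest.takeWhile (· == x)).length := by
      cases hh : rest.takeWhile (· == x) with
      | nil => exact absurd hh h
      | cons a as => simp
    rw [if_neg h]
    simp only [decide_eq_true hlen, if_true]
    push_cast
    ring

-- pvLoopA computes B's run count (both flag values at once)
theorem pvLoopA_countB (xs : List Int) : ∀ (prev x : Int),
    (pvLoopA prev (x, false) xs).1
        = x + ((pvRunsB (prev :: xs)).countP (fun run => 1 < run.length) : Int)
    ∧ (pvLoopA prev (x, true) xs).1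
        = x + ((pvRunsB (xs.dropWhile (· == prev))).countP (fun run => 1 < run.length) : Int) := by
  induction xs with
  | nil => intro prev x; simp [pvLoopA, pvRunsB_cons, pvRunsB_nil]
  | cons y ys ih =>
    intro prev x
    constructor
    · rw [pvCountB_cons]
      by_cases h : prev = y
      · rw [pvLoopA, if_pos ⟨h, rfl⟩]
        have := (ih y (x + 1)).2
        rw [this]
        have ht : (y :: ys).takeWhile (· == prev) ≠ [] := by
          subst h; simp [List.takeWhile_cons]
        have hd : (y :: ys).dropWhile (· == prev) = ys.dropWhile (· == prev) := by
          subst h; simp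
        rw [hd, if_neg ht]
        subst h; ring
      · rw [pvLoopA, if_neg (by simp [h]), if_pos (by simp [h])]
        have := (ih y x).1
        rw [this]
        have ht : (y :: ys).takeWhile (· == prev) = [] := by
          simp
          intro hc; exact absurd hc.symm h
        have hd : (y :: ys).dropWhile (· == prev) = y :: ys := by
          simp
          intro hc; exact absurd hc.symm h
        rw [ht, hd]
        simp
    · by_cases h : prev = y
      · rw [pvLoopA, if_neg (by simp), if_neg (by simp [h])]
        have := (ih y x).2
        rw [this]
        have hd : (y :: ys).dropWhile (· == prev) = ys.dropWhile (· == prev) := by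
          subst h; simp
        rw [hd]; subst h; rfl
      · rw [pvLoopA, if_neg (by simp), if_pos (by simp [h])]
        have := (ih y x).1
        rw [this]
        have hd : (y :: ys).dropWhile (· == prev) = y :: ys := by
          simp
          intro hc; exact absurd hc.symm h
        rw [hd]

-- ===== VERDICT (by name: the statement is the Claim_ definition above) =====
theorem series_repetidas_spec : Claim_equal_series_repetidas := by
  intro l _
  unfold Spec_series_repetidas series_repetidas series_repetidas_alt
  cases l with
  | nil => simp [PySem.List.pyRange_one_eq_nil, pvRunsB_nil]
  | cons a xs =>
    have := pvBridge (a :: xs) 1 (le_refl 1) (0, false)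
    rw [show ((1 : Nat) : Int) = 1 from rfl] at this
    rw [this]
    simpa using ((pvLoopA_countB xs a 0).1)
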